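-- pv_equiv track=rewrite | github.com/thePeras/VCOM_Chessboard | task3.py | matrix_to_fen
-- ===== SOURCE A (Python) =====
-- def matrix_to_fen(board_matrix):
--     fen_rows = []
--     for row in board_matrix:
--         empty_count = 0
--         fen_row = ""
--         for cell in row:
--             if cell == "*":
--                 empty_count += 1
--             else:
--                 if empty_count > 0:
--                     fen_row += str(empty_count)
--                     empty_count = 0
--                 fen_row += cell
--         if empty_count > 0:
--             fen_row += str(empty_count)
--         fen_rows.append(fen_row)
--     return "/".join(fen_rows)
-- ===== SOURCE B (Python) =====
-- def matrix_to_fen(board_matrix):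
--     # run-length grouping per row: extract maximal runs of "*" / non-"*" cells
--     def fen_row(row):
--         parts = []
--         i = 0
--         n = len(row)
--         while i < n:
--             j = i
--             if row[i] == "*":
--                 while j < n and row[j] == "*":
--                     j += 1
--                 parts.append(str(j - i))
--             else:
--                 while j < n and row[j] != "*":
--                     j += 1
--                 parts.append("".join(row[i:j]))
--             i = j
--         return "".join(parts)
--     return "/".join(fen_row(row) for row in board_matrix)
-- ===== Notes on version B (the rewrite author's own statement) =====
-- stated objective: alternative
-- what changed: Replaces A's incremental empty-counter/flush state machine with run-length grouping: each row is split into maximal runs of '*' and non-'*' cells, emitting the run length resp. the joined cells.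
import Mathlib
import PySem

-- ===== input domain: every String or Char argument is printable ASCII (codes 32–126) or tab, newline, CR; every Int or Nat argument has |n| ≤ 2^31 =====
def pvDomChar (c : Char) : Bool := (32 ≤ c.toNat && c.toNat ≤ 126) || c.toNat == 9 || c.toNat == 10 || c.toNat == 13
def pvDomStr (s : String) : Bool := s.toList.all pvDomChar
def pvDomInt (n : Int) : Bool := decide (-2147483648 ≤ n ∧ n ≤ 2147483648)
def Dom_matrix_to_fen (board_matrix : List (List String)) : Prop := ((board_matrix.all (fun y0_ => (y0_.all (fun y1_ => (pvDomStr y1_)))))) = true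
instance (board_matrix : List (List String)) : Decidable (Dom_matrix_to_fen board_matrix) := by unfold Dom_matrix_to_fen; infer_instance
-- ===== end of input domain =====

-- B replaces A's incremental empty-counter/flush state machine by run-length grouping
-- (maximal runs of "*" / non-"*" cells per row); same cost, different decomposition.

-- ===== PORT A =====
-- inner loop body of A: state (empty_count, fen_row)
def stepA (st : Int × String) (cell : String) : Int × String :=
  if cell == "*" then (st.1 + 1, st.2)
  else (0, (if st.1 > 0 then st.2 ++ PySem.Int.toStr st.1 else st.2) ++ cell)

-- final flush after the inner loop
def finishA (st : Int × String) : String :=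
  if st.1 > 0 then st.2 ++ PySem.Int.toStr st.1 else st.2

def fenRowA (row : List String) : String :=
  finishA (row.foldl stepA (0, ""))

def matrix_to_fen (board_matrix : List (List String)) : String :=
  PySem.Str.join "/" (board_matrix.foldl (fun acc row => acc ++ [fenRowA row]) [])

-- ===== PORT B =====
-- Source B's fen_row: peel off the maximal run starting at the head ('while j < n and …'),
-- emit its length (star run) or its joined cells (non-star run), continue after it.
def fenRowB (row : List String) : String :=
  match row with
  | [] => ""
  | c :: rest =>
    if c == "*" then
      let run := rest.takeWhile (fun d => d == "*")
      PySem.Int.toStr ((run.length + 1 : Nat) : Int) ++ fenRowB (rest.dropWhile (fun d => d == "*"))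
    else
      let run := rest.takeWhile (fun d => !(d == "*"))
      String.join (c :: run) ++ fenRowB (rest.dropWhile (fun d => !(d == "*")))
termination_by row.length
decreasing_by
  · exact Nat.lt_succ_of_le (List.length_dropWhile_le _ _)
  · exact Nat.lt_succ_of_le (List.length_dropWhile_le _ _)

def matrix_to_fen_alt (board_matrix : List (List String)) : String :=
  PySem.Str.join "/" (board_matrix.map fenRowB)

-- ===== PRECONDITION & SPEC =====
def Spec_matrix_to_fen (board_matrix : List (List String)) (out : String) : Prop := out = matrix_to_fen_alt board_matrix
instance (board_matrix : List (List String)) (out : String) : Decidable (Spec_matrix_to_fen board_matrix out) := by unfold Spec_matrix_to_fen; infer_instance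

-- ===== CLAIM (what is proved, stated in full; the proofs are below) =====
def Claim_equal_matrix_to_fen : Prop := ∀ (board_matrix : List (List String)), Dom_matrix_to_fen board_matrix → Spec_matrix_to_fen board_matrix (matrix_to_fen board_matrix)

-- ===== LEMMAS AND PROOFS =====

-- String.join distributes over cons (via a foldl generalisation)
lemma sfoldl_append (l : List String) : ∀ (s t : String),
    List.foldl (fun r u => r ++ u) (s ++ t) l = s ++ List.foldl (fun r u => r ++ u) t l := by
  induction l with
  | nil => intro s t; rfl
  | cons u tl ih =>
    intro s t
    simp only [List.foldl_cons, String.append_assoc, ih]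

lemma sjoin_cons (a : String) (l : List String) : String.join (a :: l) = a ++ String.join l := by
  show List.foldl (fun r u => r ++ u) "" (a :: l) = a ++ List.foldl (fun r u => r ++ u) "" l
  rw [List.foldl_cons, String.empty_append]
  simpa [String.append_empty] using sfoldl_append l a ""

-- a non-star run followed by the rest is exactly what fenRowB emits for that suffix
lemma join_takeWhile_nonstar (rest : List String) :
    String.join (rest.takeWhile (fun d => !(d == "*"))) ++ fenRowB (rest.dropWhile (fun d => !(d == "*"))) = fenRowB rest := by
  cases rest with
  | nil => simp [fenRowB, String.join]
  | cons d tl =>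
    by_cases hd : (d == "*") = true
    · simp [hd, String.join, String.empty_append]
    · have hd' : (d == "*") = false := by simpa using hd
      conv_rhs => rw [fenRowB]
      simp [hd']

lemma fenRowB_cons_nonstar (c : String) (rest : List String) (hc : (c == "*") = false) :
    fenRowB (c :: rest) = c ++ fenRowB rest := by
  rw [fenRowB]
  simp only [hc, Bool.false_eq_true, if_false]
  rw [sjoin_cons, String.append_assoc, join_takeWhile_nonstar]

lemma takeWhile_replicate_star (k : Nat) (l : List String) :
    ((List.replicate k "*" ++ l).takeWhile (fun d => d == "*")) = List.replicate k "*" ++ l.takeWhile (fun d => d == "*") := by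
  induction k with
  | zero => simp
  | succ k ih => simp [List.replicate_succ, ih]

lemma dropWhile_replicate_star (k : Nat) (l : List String) :
    ((List.replicate k "*" ++ l).dropWhile (fun d => d == "*")) = l.dropWhile (fun d => d == "*") := by
  induction k with
  | zero => simp
  | succ k ih => simp [List.replicate_succ, ih]

lemma fenRowB_replicate_nil (k : Nat) :
    fenRowB (List.replicate k "*") = if 0 < k then PySem.Int.toStr (k : Int) else "" := by
  cases k with
  | zero => simp [fenRowB]
  | succ k =>
    rw [List.replicate_succ, fenRowB]
    simp [fenRowB]

lemma fenRowB_replicate_nonstar (k : Nat) (c : String) (rest : List String) (hc : (c == "*") = false) :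
    fenRowB (List.replicate k "*" ++ c :: rest)
      = (if 0 < k then PySem.Int.toStr (k : Int) else "") ++ fenRowB (c :: rest) := by
  cases k with
  | zero => simp [String.empty_append]
  | succ k =>
    rw [List.replicate_succ, List.cons_append, fenRowB]
    simp only [BEq.rfl, if_true, takeWhile_replicate_star, dropWhile_replicate_star,
      List.takeWhile_cons, List.dropWhile_cons, hc, Bool.false_eq_true, if_false,
      List.append_nil, List.length_replicate, Nat.succ_pos, if_true]

-- loop invariant: running A's inner loop from a state with ec pending stars and
-- accumulated text fr yields fr followed by B's rendering of the stars plus the rest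
lemma inner_loop_eq (row : List String) : ∀ (ec : Nat) (fr : String),
    finishA (row.foldl stepA ((ec : Int), fr)) = fr ++ fenRowB (List.replicate ec "*" ++ row) := by
  induction row with
  | nil =>
    intro ec fr
    simp only [List.foldl_nil, List.append_nil, finishA, fenRowB_replicate_nil]
    cases ec with
    | zero => simp [String.append_empty]
    | succ k => norm_num
  | cons c rest ih =>
    intro ec fr
    by_cases hc : (c == "*") = true
    · have hcs : c = "*" := by simpa using hc
      have h1 : stepA ((ec : Int), fr) c = (((ec + 1 : Nat) : Int), fr) := by
        simp [stepA, hc]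
      rw [List.foldl_cons, h1, ih (ec + 1) fr, hcs]
      have heq : List.replicate (ec + 1) "*" ++ rest = List.replicate ec "*" ++ "*" :: rest := by
        rw [List.replicate_succ' (n := ec)]; simp
      rw [heq]
    · have hc' : (c == "*") = false := by simpa using hc
      have h1 : stepA ((ec : Int), fr) c
          = (0, (if (ec : Int) > 0 then fr ++ PySem.Int.toStr (ec : Int) else fr) ++ c) := by
        simp [stepA, hc']
      rw [List.foldl_cons, h1]
      have := ih 0 ((if (ec : Int) > 0 then fr ++ PySem.Int.toStr (ec : Int) else fr) ++ c)
      simp only [Nat.cast_zero, List.replicate_zero, List.nil_append] at this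
      rw [this, fenRowB_replicate_nonstar ec c rest hc', fenRowB_cons_nonstar c rest hc']
      by_cases hec : 0 < ec
      · simp [hec, String.append_assoc]
      · simp [hec, String.empty_append, String.append_assoc]

lemma fenRow_eq (row : List String) : fenRowA row = fenRowB row := by
  have h := inner_loop_eq row 0 ""
  simpa [fenRowA, String.empty_append] using h

-- ===== VERDICT (by name: the statement is the Claim_ definition above) =====
theorem matrix_to_fen_spec : Claim_equal_matrix_to_fen := by
  intro bm _
  show matrix_to_fen bm = matrix_to_fen_alt bm
  unfold matrix_to_fen matrix_to_fen_alt
  rw [PySem.List.foldl_append_singleton_eq_map]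
  congr 1
  exact List.map_congr_left (fun row _ => fenRow_eq row)
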